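-- pv_equiv track=rewrite | github.com/eat-or-eat/forward_max_match | method_comparison.py | prefix_cut
-- ===== SOURCE A (Python) =====
-- def prefix_cut(prefix_dict, input_str):
--     if input_str == '':
--         return []
--     words = []
--     start, end = 0, 1
--     candidate = input_str[0]
--     while start < len(input_str) and end <= len(input_str):
--         segment = input_str[start:end]
--         if segment not in prefix_dict:  # 两种可能，一种是candidate不在前缀字典里，一种是candidate为1的真词才会跳进来更新词
--             words.append(candidate)
--             start += len(candidate)
--             if start == len(input_str):
--                 break
--             candidate = input_str[start]
--             end = start + 1
--         else:
--             if prefix_dict[segment] == 1:  # 前向遍历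
--                 candidate = segment
--             end += 1
--     if start != len(input_str):
--         words.append(candidate)
--     return words
-- ===== SOURCE B (Python) =====
-- def prefix_cut(prefix_dict, input_str):
--     # Build a trie over the dictionary keys once; then scan the input left to
--     # right, walking the trie char-by-char (no re-slicing), tracking the length
--     # of the longest prefix whose dict value is 1 (fallback: a single char).
--     # If a walk is still on dictionary keys when the input runs out, the last
--     # confirmed word is emitted and segmentation finishes (as in A).
--     root = {}  # char -> node; node = [is_key, is_word, children]
--     for key, val in prefix_dict.items():
--         if key == '':
--             continue  # a scanned segment is never empty, so '' can never match
--         children = root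
--         node = None
--         for ch in key:
--             node = children.get(ch)
--             if node is None:
--                 node = [False, False, {}]
--                 children[ch] = node
--             children = node[2]
--         node[0] = True
--         node[1] = (val == 1)
--     n = len(input_str)
--     words = []
--     i = 0
--     while i < n:
--         best = 1
--         children = root
--         j = i
--         ran_off = True  # stays True iff the walk reaches the end of the input
--         while j < n:
--             node = children.get(input_str[j])
--             if node is None or not node[0]:
--                 ran_off = False
--                 break
--             j += 1
--             if node[1]:
--                 best = j - i
--             children = node[2]
--         words.append(input_str[i:i + best])
--         i += best
--         if ran_off:
--             break
--     return words
-- ===== Notes on version B (the rewrite author's own statement) =====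
-- stated objective: alternative
-- what changed: A re-slices input_str[start:end] and hashes each slice against the dict for every scan step; B builds a trie over the dictionary keys once and segments by walking the trie character by character, tracking the end of the last value-1 word, so no substring is sliced or hashed while scanning (asymptotically fewer character touches, but the interpreted trie walk does not beat CPython's C-level slice hashing on the measured inputs).
import Mathlib
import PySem

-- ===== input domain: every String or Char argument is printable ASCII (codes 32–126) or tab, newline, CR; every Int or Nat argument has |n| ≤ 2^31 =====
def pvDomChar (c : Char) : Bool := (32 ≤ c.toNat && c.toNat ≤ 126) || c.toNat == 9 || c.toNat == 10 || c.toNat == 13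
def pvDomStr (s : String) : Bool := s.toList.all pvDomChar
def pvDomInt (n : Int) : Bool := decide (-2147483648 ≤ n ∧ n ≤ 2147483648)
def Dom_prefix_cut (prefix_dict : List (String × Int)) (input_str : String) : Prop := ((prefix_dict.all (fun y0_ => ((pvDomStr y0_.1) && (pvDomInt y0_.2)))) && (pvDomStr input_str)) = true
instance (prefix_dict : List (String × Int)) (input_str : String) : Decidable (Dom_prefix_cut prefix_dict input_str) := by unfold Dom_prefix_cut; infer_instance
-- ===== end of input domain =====

-- B rebuilds the dictionary as a trie once and scans the input char-by-char (no re-slicing),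
-- same return value for every input.

-- ===== PORT A =====
-- A's while-loop; start/e/cand/acc are exactly Python's start/end/candidate/words.
-- The fuel argument only bounds the recursion: with the fuel prefix_cut passes, the
-- loop-exit test fails before fuel runs out (the fuel-0 value is the loop-exit value).
def loopA (d : PySem.Dict String Int) (s : List Char) :
    Nat → Nat → Nat → List Char → List String → List String
  | 0, start, _, cand, acc => if start ≠ s.length then acc ++ [String.ofList cand] else acc
  | fuel + 1, start, e, cand, acc =>
    if start < s.length ∧ e ≤ s.length then
      let seg : List Char := PySem.List.slice s (some (start : Int)) (some (e : Int))
      if d.contains (String.ofList seg) then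
        (if d.getD (String.ofList seg) 0 = 1 then
          loopA d s fuel start (e + 1) seg acc
        else
          loopA d s fuel start (e + 1) cand acc)
      else
        let acc' := acc ++ [String.ofList cand]
        let start' := start + cand.length
        if start' = s.length then acc'
        else loopA d s fuel start' (start' + 1) ((s.drop start').take 1) acc'
    else
      if start ≠ s.length then acc ++ [String.ofList cand] else acc

def prefix_cut (prefix_dict : List (String × Int)) (input_str : String) : List String :=
  -- candidate = input_str[0] is input_str.toList.take 1 (a one-char segment)
  if input_str.toList = [] then []
  else
    loopA (PySem.Dict.ofList prefix_dict) input_str.toList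
      ((input_str.toList.length + 1) * (input_str.toList.length + 2))
      0 1 (input_str.toList.take 1) []

-- ===== PORT B =====
-- trie node: char, is-a-dict-key flag, value==1 flag, first child, next sibling
inductive PTrie
  | nil : PTrie
  | node (c : Char) (isKey : Bool) (isWord : Bool) (child sib : PTrie) : PTrie
deriving DecidableEq, Repr

-- the fresh chain of nodes Source B's inner 'for ch in key' loop creates for the unmatched tail of a key
def chainT : List Char → Bool → PTrie
  | [], _ => PTrie.nil
  | [c], fl => PTrie.node c true fl PTrie.nil PTrie.nil
  | c :: r1 :: rs, fl => PTrie.node c false false (chainT (r1 :: rs) fl) PTrie.nil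

-- insert one key with its (value == 1) flag (Source B's inner 'for ch in key' loop)
def insT : PTrie → List Char → Bool → PTrie
  | t, [], _ => t
  | PTrie.nil, c :: rest, fl => chainT (c :: rest) fl
  | PTrie.node c' k w ch sib, c :: rest, fl =>
    if c = c' then
      (match rest with
       | [] => PTrie.node c' true fl ch sib
       | r1 :: rs => PTrie.node c' k w (insT ch (r1 :: rs) fl) sib)
    else PTrie.node c' k w ch (insT sib (c :: rest) fl)
termination_by structural t => t

-- children.get(ch): find ch in the sibling chain, return its flags and child list
def seek : PTrie → Char → Option (Bool × Bool × PTrie)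
  | PTrie.nil, _ => none
  | PTrie.node c' k w ch sib, c => if c = c' then some (k, w, ch) else seek sib c

-- Source B's trie-building loop over prefix_dict.items()
def buildT (prefix_dict : List (String × Int)) : PTrie :=
  (PySem.Dict.ofList prefix_dict).items.foldl
    (fun t kv => if kv.1 = "" then t else insT t kv.1.toList (kv.2 == 1)) PTrie.nil

-- Source B's inner while: walk the trie from position i, returning (best, ran_off); the fuel
-- argument only bounds the recursion (j < s.length fails before fuel runs out at every
-- call site, and the fuel-0 value is the j = length value)
def walkB (s : List Char) (i : Nat) : Nat → PTrie → Nat → Nat → Nat × Bool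
  | 0, _, _, best => (best, true)
  | fuel + 1, t, j, best =>
    if h : j < s.length then
      match seek t s[j] with
      | none => (best, false)
      | some (k, w, ch) =>
        if k then walkB s i fuel ch (j + 1) (if w then j + 1 - i else best) else (best, false)
    else (best, true)

-- Source B's outer while over i (fuel likewise only bounds the recursion); the break on
-- ran_off is the early return
def segB (s : List Char) (root : PTrie) : Nat → Nat → List String → List String
  | 0, _, words => words
  | fuel + 1, i, words =>
    if i < s.length then
      let r := walkB s i (s.length - i) root i 1
      let words' := words ++ [String.ofList (PySem.List.slice s (some (i : Int)) (some ((i + r.1 : Nat) : Int)))]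
      if r.2 then words' else segB s root fuel (i + r.1) words'
    else words

def prefix_cut_alt (prefix_dict : List (String × Int)) (input_str : String) : List String :=
  segB input_str.toList (buildT prefix_dict) input_str.toList.length 0 []

-- ===== PRECONDITION & SPEC =====
def Spec_prefix_cut (prefix_dict : List (String × Int)) (input_str : String) (out : List String) : Prop := out = prefix_cut_alt prefix_dict input_str
instance (prefix_dict : List (String × Int)) (input_str : String) (out : List String) : Decidable (Spec_prefix_cut prefix_dict input_str out) := by unfold Spec_prefix_cut; infer_instance

-- ===== CLAIM (what is proved, stated in full; the proofs are below) =====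
def Claim_equal_prefix_cut : Prop := ∀ (prefix_dict : List (String × Int)) (input_str : String), Dom_prefix_cut prefix_dict input_str → Spec_prefix_cut prefix_dict input_str (prefix_cut prefix_dict input_str)

-- ===== LEMMAS AND PROOFS =====

-- the canonical greedy scan both ports compute: from position p, extend the segment while
-- it is a dict key, remembering the length of the last segment whose value is 1 (best,
-- fallback 1); the Bool says whether the scan ran off the end of the string.  fuel ≥
-- s.length + 1 - e makes the recursion structural; the fuel-0 value agrees with the
-- e > s.length branch.
def scanAux (d : PySem.Dict String Int) (s : List Char) (p : Nat) : Nat → Nat → Nat → Nat × Bool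
  | 0, _, best => (best, true)
  | fuel + 1, e, best =>
    if e ≤ s.length then
      if d.contains (String.ofList ((s.drop p).take (e - p))) then
        scanAux d s p fuel (e + 1)
          (if d.getD (String.ofList ((s.drop p).take (e - p))) 0 = 1 then e - p else best)
      else (best, false)
    else (best, true)

def scanP (d : PySem.Dict String Int) (s : List Char) (p : Nat) : Nat × Bool :=
  scanAux d s p (s.length - p) (p + 1) 1

theorem scanAux_bounds (d : PySem.Dict String Int) (s : List Char) (p : Nat) :
    ∀ fuel e best, p < e → 1 ≤ best → p + best ≤ s.length →
      1 ≤ (scanAux d s p fuel e best).1 ∧ p + (scanAux d s p fuel e best).1 ≤ s.length := by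
  intro fuel
  induction fuel with
  | zero => intro e best he hb hl; simp [scanAux]; omega
  | succ fuel ih =>
    intro e best he hb hl
    simp only [scanAux]
    split
    · split
      · refine ih (e + 1) _ (by omega) ?_ ?_
        · split <;> omega
        · split <;> omega
      · simp; omega
    · simp; omega

-- the canonical segmentation both ports compute; stops when the scan ran off the end
def segSpec (d : PySem.Dict String Int) (s : List Char) : Nat → Nat → List String → List String
  | 0, _, acc => acc
  | fuel + 1, p, acc =>
    if p < s.length then
      let r := scanP d s p
      let acc' := acc ++ [String.ofList ((s.drop p).take r.1)]
      if r.2 then acc' else segSpec d s fuel (p + r.1) acc'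
    else acc

theorem segSpec_ge (d : PySem.Dict String Int) (s : List Char) :
    ∀ fuel p acc, ¬ p < s.length → segSpec d s fuel p acc = acc := by
  intro fuel p acc h
  cases fuel with
  | zero => rfl
  | succ fuel => simp [segSpec, h]

theorem segSpec_fuel (d : PySem.Dict String Int) (s : List Char) :
    ∀ f1 f2 p acc, s.length - p ≤ f1 → s.length - p ≤ f2 →
      segSpec d s f1 p acc = segSpec d s f2 p acc := by
  intro f1
  induction f1 with
  | zero =>
    intro f2 p acc h1 h2
    rw [segSpec_ge d s 0 p acc (by omega), segSpec_ge d s f2 p acc (by omega)]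
  | succ f1 ih =>
    intro f2 p acc h1 h2
    by_cases hp : p < s.length
    · obtain ⟨g, rfl⟩ : ∃ g, f2 = g + 1 := ⟨f2 - 1, by omega⟩
      simp only [segSpec, if_pos hp]
      split
      · rfl
      · have hb := scanAux_bounds d s p (s.length - p) (p + 1) 1 (by omega) (by omega) (by omega)
        exact ih g _ _ (by unfold scanP at *; omega) (by unfold scanP at *; omega)
    · rw [segSpec_ge d s (f1 + 1) p acc hp, segSpec_ge d s f2 p acc hp]

-- facts used by the loopA lemmas below
theorem pvInitNeNilHelper (s : List Char) (h : s ≠ []) : s.take 1 ≠ [] := by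
  simp [List.take_eq_nil_iff, h]

theorem pvSegNeNil (s : List Char) (start e : Nat) (h1 : start < s.length) (h2 : start < e) :
    PySem.List.slice s (some (start : Int)) (some (e : Int)) ≠ [] := by
  rw [PySem.List.slice_natCast]
  intro hnil
  have h3 := congrArg List.length hnil
  simp [List.length_take, List.length_drop, Nat.min_eq_zero_iff] at h3
  omega

theorem pvSegLenLe (s : List Char) (start e : Nat) (h1 : start < s.length) (h : e ≤ s.length) :
    start + (PySem.List.slice s (some (start : Int)) (some (e : Int))).length ≤ s.length := by
  rw [PySem.List.slice_natCast]
  have h2 := List.length_take_le (e - start) (s.drop start)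
  omega

theorem pvTake1NeNil (s : List Char) (p : Nat) (h : p < s.length) : (s.drop p).take 1 ≠ [] := by
  intro hnil
  have h3 := congrArg List.length hnil
  simp [List.length_take, List.length_drop, Nat.min_eq_zero_iff] at h3
  omega

-- the termination measure of Python A's while-loop; loopA's value does not depend on the
-- fuel once the fuel is at least this measure
def measA (s : List Char) (start e : Nat) : Nat :=
  (s.length - start) * (s.length + 2) + (s.length + 1 - e)

theorem measA_dec_start (s : List Char) (start e : Nat) (C : Nat) (hC : 0 < C)
    (hS : start + C ≤ s.length) :
    measA s (start + C) (start + C + 1) < measA s start e := by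
  unfold measA
  have hm1 : (s.length - (start + C) + 1) * (s.length + 2) ≤ (s.length - start) * (s.length + 2) :=
    Nat.mul_le_mul_right _ (by omega)
  have hexp : (s.length - (start + C) + 1) * (s.length + 2)
      = (s.length - (start + C)) * (s.length + 2) + (s.length + 2) := by ring
  omega

theorem loopA_fuel (d : PySem.Dict String Int) (s : List Char) :
    ∀ F1 F2 start e cand acc, cand ≠ [] → start + cand.length ≤ s.length → start < e →
      measA s start e ≤ F1 → measA s start e ≤ F2 →
      loopA d s F1 start e cand acc = loopA d s F2 start e cand acc := by
  intro F1
  induction F1 with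
  | zero =>
    intro F2 start e cand acc hc hs he h1 h2
    have hge : ¬ (start < s.length ∧ e ≤ s.length) := by
      intro hcon
      have : 0 < measA s start e := by
        unfold measA
        have : 1 ≤ (s.length - start) * (s.length + 2) :=
          Nat.one_le_iff_ne_zero.mpr (by
            intro h0
            rcases Nat.mul_eq_zero.mp h0 with h0 | h0 <;> omega)
        omega
      omega
    cases F2 with
    | zero => rfl
    | succ F2 => simp only [loopA, if_neg hge]
  | succ F1 ih =>
    intro F2 start e cand acc hc hs he h1 h2
    by_cases hg : start < s.length ∧ e ≤ s.length
    · have hmeas : 1 ≤ measA s start e - 1 := by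
        unfold measA at *
        have h3 : 1 ≤ (s.length - start) * (s.length + 2) :=
          Nat.one_le_iff_ne_zero.mpr (by
            intro h0
            rcases Nat.mul_eq_zero.mp h0 with h0 | h0 <;> omega)
        omega
      obtain ⟨G2, rfl⟩ : ∃ G2, F2 = G2 + 1 := ⟨F2 - 1, by
        have : 0 < measA s start e := by
          unfold measA
          have h3 : 1 ≤ (s.length - start) * (s.length + 2) :=
            Nat.one_le_iff_ne_zero.mpr (by
              intro h0
              rcases Nat.mul_eq_zero.mp h0 with h0 | h0 <;> omega)
          omega
        omega⟩
      simp only [loopA, if_pos hg]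
      have hde : measA s start (e + 1) < measA s start e := by
        unfold measA; omega
      by_cases hcont : d.contains (String.ofList (PySem.List.slice s (some (start : Int)) (some (e : Int))))
      · simp only [if_pos hcont]
        by_cases hgd : d.getD (String.ofList (PySem.List.slice s (some (start : Int)) (some (e : Int)))) 0 = 1
        · simp only [if_pos hgd]
          exact ih G2 start (e + 1) _ acc (pvSegNeNil s start e hg.1 he)
            (pvSegLenLe s start e hg.1 hg.2) (by omega) (by omega) (by omega)
        · simp only [if_neg hgd]
          exact ih G2 start (e + 1) cand acc hc hs (by omega) (by omega) (by omega)
      · simp only [if_neg hcont]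
        by_cases hstop : start + cand.length = s.length
        · simp only [if_pos hstop]
        · simp only [if_neg hstop]
          have hcl := List.length_pos_of_ne_nil hc
          have hlt : start + cand.length < s.length := by omega
          have hdec := measA_dec_start s start e cand.length hcl hs
          exact ih G2 (start + cand.length) (start + cand.length + 1) _ _
            (pvTake1NeNil s _ hlt)
            (by
              have h4 := List.length_take_le 1 (s.drop (start + cand.length))
              have h5 : (s.drop (start + cand.length)).length = s.length - (start + cand.length) :=
                List.length_drop
              omega)
            (by omega) (by omega) (by omega)
    · cases F2 with
      | zero => simp only [loopA, if_neg hg]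
      | succ F2 => simp only [loopA, if_neg hg]

-- A's loop at a fresh position, as a total function of the position (canonical fuel)
def contA (d : PySem.Dict String Int) (s : List Char) (p : Nat) (acc : List String) : List String :=
  if p < s.length then
    loopA d s (measA s p (p + 1)) p (p + 1) ((s.drop p).take 1) acc
  else acc

theorem loopA_inner (d : PySem.Dict String Int) (s : List Char) (p : Nat) (hp : p < s.length) :
    ∀ F e best cand acc, cand ≠ [] → p + cand.length ≤ s.length → p < e →
      measA s p e ≤ F →
      1 ≤ best → p + best ≤ s.length → cand = (s.drop p).take best →
      loopA d s F p e cand acc =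
        (let r := scanAux d s p (s.length + 1 - e) e best
         let acc' := acc ++ [String.ofList ((s.drop p).take r.1)]
         if r.2 then acc' else contA d s (p + r.1) acc') := by
  intro F
  induction F with
  | zero =>
    intro e best cand acc hc hs he hm hb hbl hcand
    exfalso
    unfold measA at hm
    have h3 : 1 ≤ (s.length - p) * (s.length + 2) :=
      Nat.one_le_iff_ne_zero.mpr (by
        intro h0
        rcases Nat.mul_eq_zero.mp h0 with h0 | h0 <;> omega)
    omega
  | succ F ih =>
    intro e best cand acc hc hs he hm hb hbl hcand
    by_cases hle : e ≤ s.length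
    · simp only [loopA, if_pos (⟨hp, hle⟩ : p < s.length ∧ e ≤ s.length)]
      have hseg : PySem.List.slice s (some (p : Int)) (some (e : Int)) = (s.drop p).take (e - p) :=
        PySem.List.slice_natCast s p e
      simp only [hseg]
      obtain ⟨G, hG⟩ : ∃ G, s.length + 1 - e = G + 1 := ⟨s.length - e, by omega⟩
      rw [hG]
      by_cases hcont : d.contains (String.ofList ((s.drop p).take (e - p)))
      · rw [if_pos hcont]
        by_cases hgd : d.getD (String.ofList ((s.drop p).take (e - p))) 0 = 1
        · rw [if_pos hgd]
          rw [ih (e + 1) (e - p) _ acc (pvSegNeNil s p e hp he |>.imp (by rw [hseg]; exact id))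
              (by rw [← hseg]; exact pvSegLenLe s p e hp hle)
              (by omega) (by unfold measA at *; omega) (by omega) (by omega) rfl]
          simp only [scanAux]
          rw [if_pos hle, if_pos hcont, if_pos hgd]
          rw [show s.length + 1 - (e + 1) = G from by omega]
        · rw [if_neg hgd]
          rw [ih (e + 1) best cand acc hc hs (by omega) (by unfold measA at *; omega) hb hbl hcand]
          simp only [scanAux]
          rw [if_pos hle, if_pos hcont, if_neg hgd]
          rw [show s.length + 1 - (e + 1) = G from by omega]
      · rw [if_neg hcont]
        have hclen : cand.length = best := by
          rw [hcand]
          have h4 := List.length_take_le best (s.drop p)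
          have h5 : ((s.drop p).take best).length = min best (s.length - p) := by
            simp [List.length_take, List.length_drop]
          omega
        simp only [scanAux]
        rw [if_pos hle, if_neg hcont]
        simp only []
        by_cases hstop : p + cand.length = s.length
        · rw [if_pos hstop]
          unfold contA
          rw [if_neg (show ¬ p + best < s.length by omega), hcand]
          simp
        · rw [if_neg hstop]
          unfold contA
          rw [if_pos (show p + best < s.length by omega)]
          rw [if_neg (show ¬ (false = true) by simp)]
          rw [hclen, hcand]
          have hlt' : p + best < s.length := by omega
          exact loopA_fuel d s F (measA s (p + best) (p + best + 1)) (p + best) (p + best + 1)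
            _ _ (pvTake1NeNil s _ hlt')
            (by
              have h4 := List.length_take_le 1 (s.drop (p + best))
              have h5 : (s.drop (p + best)).length = s.length - (p + best) := List.length_drop
              omega)
            (by omega)
            (by
              have hdec := measA_dec_start s p e best hb hbl
              omega)
            (le_refl _)
    · simp only [loopA, if_neg (show ¬ (p < s.length ∧ e ≤ s.length) by omega),
        if_pos (show p ≠ s.length by omega)]
      rw [show s.length + 1 - e = 0 from by omega]
      simp [scanAux, hcand]

theorem contA_eq_segSpec (d : PySem.Dict String Int) (s : List Char) :
    ∀ fuel p acc, s.length - p ≤ fuel →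
      contA d s p acc = segSpec d s fuel p acc := by
  intro fuel
  induction fuel with
  | zero =>
    intro p acc hf
    rw [segSpec_ge d s 0 p acc (by omega)]
    unfold contA
    rw [if_neg (show ¬ p < s.length by omega)]
  | succ fuel ih =>
    intro p acc hf
    by_cases hpl : p < s.length
    · have hinner := loopA_inner d s p hpl (measA s p (p + 1)) (p + 1) 1
        ((s.drop p).take 1) acc (pvTake1NeNil s p hpl)
        (by
          have h4 := List.length_take_le 1 (s.drop p)
          have h5 : (s.drop p).length = s.length - p := List.length_drop
          omega)
        (by omega) (le_refl _) (by omega) (by omega) rfl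
      have hb := scanAux_bounds d s p (s.length - p) (p + 1) 1 (by omega) (by omega) (by omega)
      conv_lhs => rw [contA, if_pos hpl]
      rw [hinner]
      simp only [show scanAux d s p (s.length + 1 - (p + 1)) (p + 1) 1 = scanP d s p from by
        unfold scanP
        congr 1
        omega]
      simp only [segSpec, if_pos hpl]
      show (if (scanP d s p).2 then _ else _) = _
      by_cases hoff : (scanP d s p).2
      · rw [if_pos hoff]
        simp [hoff]
      · rw [if_neg hoff]
        simp only [hoff]
        rw [ih (p + (scanP d s p).1) _ (by unfold scanP at *; omega)]
        simp
    · unfold contA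
      rw [if_neg hpl, segSpec_ge d s (fuel + 1) p acc hpl]

theorem prefix_cut_eq (prefix_dict : List (String × Int)) (input_str : String) :
    prefix_cut prefix_dict input_str =
      segSpec (PySem.Dict.ofList prefix_dict) input_str.toList
        (input_str.toList.length + 1) 0 [] := by
  rw [← contA_eq_segSpec _ _ (input_str.toList.length + 1) 0 [] (by omega)]
  unfold prefix_cut contA
  by_cases h : input_str.toList = []
  · rw [if_pos h, if_neg (by simp [h])]
  · have hlen := List.length_pos_of_ne_nil h
    rw [if_neg h, if_pos hlen, List.drop_zero]
    apply loopA_fuel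
    · exact pvInitNeNilHelper input_str.toList h
    · have h1 := List.length_take_le 1 input_str.toList
      omega
    · omega
    · unfold measA
      have hmul : (input_str.toList.length + 1) * (input_str.toList.length + 2)
          = input_str.toList.length * (input_str.toList.length + 2) + (input_str.toList.length + 2) := by ring
      have hle : (input_str.toList.length - 0) * (input_str.toList.length + 2)
          ≤ input_str.toList.length * (input_str.toList.length + 2) := by simp
      omega
    · exact le_refl _

-- flags stored in the trie along a path
def flagsAt : PTrie → List Char → Bool × Bool
  | _, [] => (false, false)
  | t, c :: rest =>
    match seek t c with
    | none => (false, false)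
    | some (k, w, ch) =>
      match rest with
      | [] => (k, w)
      | _ :: _ => flagsAt ch rest

theorem flagsAt_nil : ∀ w, flagsAt PTrie.nil w = (false, false) := by
  intro w; cases w <;> simp [flagsAt, seek]

theorem flagsAt_node_ne (c' : Char) (k w0 : Bool) (ch t' : PTrie) (cw : Char) (wr : List Char)
    (h : cw ≠ c') : flagsAt (PTrie.node c' k w0 ch t') (cw :: wr) = flagsAt t' (cw :: wr) := by
  cases wr <;> simp [flagsAt, seek, h]

theorem flagsAt_node_single (c : Char) (k w0 : Bool) (ch sib : PTrie) :
    flagsAt (PTrie.node c k w0 ch sib) [c] = (k, w0) := by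
  simp [flagsAt, seek]

theorem flagsAt_node_cons (c : Char) (k w0 : Bool) (ch sib : PTrie) (a : Char) (as : List Char) :
    flagsAt (PTrie.node c k w0 ch sib) (c :: a :: as) = flagsAt ch (a :: as) := by
  simp [flagsAt, seek]

theorem flagsAt_chainT (key : List Char) (fl : Bool) :
    ∀ w, w ≠ [] →
      flagsAt (chainT key fl) w = if w = key then (true, fl) else (false, false) := by
  fun_induction chainT key fl with
  | case1 fl =>
    intro w hw
    rw [if_neg hw, flagsAt_nil]
  | case2 c fl =>
    intro w hw
    obtain ⟨cw, wr, rfl⟩ := List.exists_cons_of_ne_nil hw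
    by_cases hcw : cw = c
    · subst hcw
      cases wr with
      | nil => rw [flagsAt_node_single]; simp
      | cons a as => rw [flagsAt_node_cons, flagsAt_nil]; simp
    · rw [flagsAt_node_ne _ _ _ _ _ _ _ hcw, flagsAt_nil, if_neg (by simp [hcw])]
  | case3 c r1 rs fl ih =>
    intro w hw
    obtain ⟨cw, wr, rfl⟩ := List.exists_cons_of_ne_nil hw
    by_cases hcw : cw = c
    · subst hcw
      cases wr with
      | nil => rw [flagsAt_node_single]; simp
      | cons a as =>
        rw [flagsAt_node_cons, ih (a :: as) (by simp)]
        simp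
    · rw [flagsAt_node_ne _ _ _ _ _ _ _ hcw, flagsAt_nil, if_neg (by simp [hcw])]

theorem flagsAt_insT (t : PTrie) (key : List Char) (fl : Bool) :
    ∀ w, w ≠ [] →
      flagsAt (insT t key fl) w = if w = key then (true, fl) else flagsAt t w := by
  fun_induction insT t key fl with
  | case1 t fl =>
    intro w hw
    rw [if_neg hw]
  | case2 c rest fl =>
    intro w hw
    rw [flagsAt_chainT (c :: rest) fl w hw, flagsAt_nil]
  | case3 k0 w0 ch sib c fl =>
    intro w hw
    obtain ⟨cw, wr, rfl⟩ := List.exists_cons_of_ne_nil hw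
    by_cases hcw : cw = c
    · subst hcw
      cases wr with
      | nil => rw [flagsAt_node_single]; simp
      | cons a as =>
        rw [flagsAt_node_cons, flagsAt_node_cons]
        simp
    · rw [flagsAt_node_ne _ _ _ _ _ _ _ hcw, flagsAt_node_ne _ _ _ _ _ _ _ hcw,
          if_neg (by simp [hcw])]
  | case4 k0 w0 ch sib c fl r1 rs ih =>
    intro w hw
    obtain ⟨cw, wr, rfl⟩ := List.exists_cons_of_ne_nil hw
    by_cases hcw : cw = c
    · subst hcw
      cases wr with
      | nil => rw [flagsAt_node_single, flagsAt_node_single]; simp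
      | cons a as =>
        rw [flagsAt_node_cons, flagsAt_node_cons, ih (a :: as) (by simp)]
        simp
    · rw [flagsAt_node_ne _ _ _ _ _ _ _ hcw, flagsAt_node_ne _ _ _ _ _ _ _ hcw,
          if_neg (by simp [hcw])]
  | case5 c' k0 w0 ch sib c rest fl hcc ih =>
    intro w hw
    obtain ⟨cw, wr, rfl⟩ := List.exists_cons_of_ne_nil hw
    by_cases hcw : cw = c'
    · subst hcw
      have hne : (cw :: wr) ≠ c :: rest := by
        intro hcon; injection hcon with h1 _; exact hcc h1.symm
      rw [if_neg hne]
      cases wr with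
      | nil => rw [flagsAt_node_single, flagsAt_node_single]
      | cons a as => rw [flagsAt_node_cons, flagsAt_node_cons]
    · rw [flagsAt_node_ne _ _ _ _ _ _ _ hcw, flagsAt_node_ne _ _ _ _ _ _ _ hcw,
          ih (cw :: wr) (by simp)]

theorem flagsAt_foldl_not_mem (w : List Char) (hw : w ≠ []) :
    ∀ (l : List (String × Int)) (t : PTrie), (∀ kv ∈ l, kv.1.toList ≠ w) →
      flagsAt (l.foldl (fun t kv => if kv.1 = "" then t else insT t kv.1.toList (kv.2 == 1)) t) w
        = flagsAt t w := by
  intro l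
  induction l with
  | nil => intro t _; rfl
  | cons kv rest ih =>
    intro t hne
    simp only [List.foldl_cons]
    rw [ih _ (fun x hx => hne x (List.mem_cons_of_mem _ hx))]
    by_cases h0 : kv.1 = ""
    · rw [if_pos h0]
    · rw [if_neg h0, flagsAt_insT _ _ _ w hw, if_neg (fun hcon => hne kv (List.mem_cons_self) hcon.symm)]

theorem flagsAt_foldl (w : List Char) (hw : w ≠ []) :
    ∀ (l : List (String × Int)) (t : PTrie), (l.map Prod.fst).Nodup →
      flagsAt (l.foldl (fun t kv => if kv.1 = "" then t else insT t kv.1.toList (kv.2 == 1)) t) w =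
        (match (PySem.Dict.mk l).get? (String.ofList w) with
         | some v => (true, v == 1)
         | none => flagsAt t w) := by
  intro l
  induction l with
  | nil => intro t _; simp [PySem.Dict.get?]
  | cons kv rest ih =>
    obtain ⟨k1, v1⟩ := kv
    intro t hnd
    simp only [List.map_cons, List.nodup_cons] at hnd
    simp only [List.foldl_cons]
    rw [PySem.Dict.get?_mk_cons]
    by_cases hkey : k1.toList = w
    · have hk1 : k1 = String.ofList w := by rw [← hkey, String.ofList_toList]
      have h0 : k1 ≠ "" := by
        intro hcon; rw [hcon] at hkey; exact hw hkey.symm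
      rw [if_neg h0]
      rw [flagsAt_foldl_not_mem w hw rest _ ?_]
      · rw [flagsAt_insT _ _ _ w hw, if_pos hkey.symm]
        rw [if_pos (by simp [hk1])]
      · intro x hx hcon
        apply hnd.1
        have hxk : x.1 = k1 := by
          rw [hk1, ← hcon, String.ofList_toList]
        rw [← hxk]
        exact List.mem_map_of_mem hx
    · have hbe : (k1 == String.ofList w) = false := by
        apply beq_eq_false_iff_ne.mpr
        intro hcon
        exact hkey (by rw [hcon, String.toList_ofList])
      rw [hbe]
      simp only [Bool.false_eq_true, if_false]
      rw [ih _ hnd.2]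
      by_cases h0 : k1 = ""
      · rw [if_pos h0]
      · rw [if_neg h0]
        rw [flagsAt_insT _ _ _ w hw, if_neg (fun hcon => hkey hcon.symm)]

theorem flagsAt_buildT (prefix_dict : List (String × Int)) (w : List Char) (hw : w ≠ []) :
    flagsAt (buildT prefix_dict) w =
      (if (PySem.Dict.ofList prefix_dict).contains (String.ofList w) then
        (true, (PySem.Dict.ofList prefix_dict).getD (String.ofList w) 0 == 1)
       else (false, false)) := by
  unfold buildT
  rw [flagsAt_foldl w hw _ _ (by
    have := PySem.Dict.nodup_keys_ofList (κ := String) (ν := Int) prefix_dict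
    simpa [PySem.Dict.keys] using this)]
  cases hres : (PySem.Dict.ofList prefix_dict).get? (String.ofList w) with
  | some v =>
    have hc : (PySem.Dict.ofList prefix_dict).contains (String.ofList w) = true := by
      rw [PySem.Dict.contains_eq_isSome_get?, hres]; rfl
    have hg := PySem.Dict.getD_of_get?_eq_some (PySem.Dict.ofList prefix_dict) (0 : Int) hres
    simp [hc, hg]
  | none =>
    have hc : (PySem.Dict.ofList prefix_dict).contains (String.ofList w) = false := by
      rw [PySem.Dict.contains_eq_isSome_get?, hres]; rfl
    simp [hc, flagsAt_nil]

theorem flagsAt_single (t : PTrie) (c : Char) :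
    flagsAt t [c] = (match seek t c with
      | none => (false, false)
      | some (k, w, _) => (k, w)) := by
  cases hs : seek t c <;> simp [flagsAt, hs]

theorem flagsAt_cons_of_seek {t : PTrie} {c : Char} {k w : Bool} {ch : PTrie}
    (hs : seek t c = some (k, w, ch)) (w' : List Char) (hw' : w' ≠ []) :
    flagsAt t (c :: w') = flagsAt ch w' := by
  cases w' with
  | nil => exact absurd rfl hw'
  | cons a as => simp [flagsAt, hs]

theorem take_drop_succ (s : List Char) (i j : Nat) (hij : i ≤ j) (hj : j < s.length) :
    (s.drop i).take (j + 1 - i) = (s.drop i).take (j - i) ++ [s[j]] := by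
  have h1 : j + 1 - i = (j - i) + 1 := by omega
  rw [h1, List.take_add_one]
  have h2 : (s.drop i)[j - i]? = some s[j] := by
    rw [List.getElem?_drop]
    have h3 : i + (j - i) = j := by omega
    rw [h3, List.getElem?_eq_getElem hj]
  rw [h2]
  rfl

theorem walkB_eq (prefix_dict : List (String × Int)) (s : List Char) (i : Nat) :
    ∀ fuel f2 t j best, i ≤ j → s.length - j ≤ fuel → s.length - j ≤ f2 →
      (∀ w, w ≠ [] → flagsAt t w =
        flagsAt (buildT prefix_dict) ((s.drop i).take (j - i) ++ w)) →
      walkB s i fuel t j best =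
        scanAux (PySem.Dict.ofList prefix_dict) s i f2 (j + 1) best := by
  intro fuel
  induction fuel with
  | zero =>
    intro f2 t j best hij hf hf2 hinv
    have hj : ¬ j + 1 ≤ s.length := by omega
    cases f2 with
    | zero => rfl
    | succ g => simp [walkB, scanAux, hj]
  | succ fuel ih =>
    intro f2 t j best hij hf hf2 hinv
    by_cases hj : j < s.length
    · obtain ⟨g, rfl⟩ : ∃ g, f2 = g + 1 := ⟨f2 - 1, by omega⟩
      have hseg : (s.drop i).take (j + 1 - i) = (s.drop i).take (j - i) ++ [s[j]] :=
        take_drop_succ s i j hij hj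
      have hseg_ne : (s.drop i).take (j + 1 - i) ≠ [] := by
        rw [hseg]; simp
      have hroot := flagsAt_buildT prefix_dict ((s.drop i).take (j + 1 - i)) hseg_ne
      have hflag : flagsAt t [s[j]] = flagsAt (buildT prefix_dict) ((s.drop i).take (j + 1 - i)) := by
        rw [hinv [s[j]] (by simp), ← hseg]
      simp only [walkB, dif_pos hj, scanAux, if_pos (show j + 1 ≤ s.length by omega)]
      cases hseek : seek t s[j] with
      | none =>
        have hff : flagsAt (buildT prefix_dict) ((s.drop i).take (j + 1 - i)) = (false, false) := by
          rw [← hflag, flagsAt_single, hseek]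
        have hcont : (PySem.Dict.ofList prefix_dict).contains
            (String.ofList ((s.drop i).take (j + 1 - i))) = false := by
          by_contra hcon
          rw [hroot] at hff
          simp [Bool.not_eq_false] at hcon
          rw [if_pos hcon] at hff
          simp at hff
        rw [show j + 1 - i = j + 1 - i from rfl]
        rw [hcont]
        simp
      | some kwc =>
        obtain ⟨k, w, ch⟩ := kwc
        have hkw : flagsAt (buildT prefix_dict) ((s.drop i).take (j + 1 - i)) = (k, w) := by
          rw [← hflag, flagsAt_single, hseek]
        by_cases hk : k
        · subst hk
          have hcont : (PySem.Dict.ofList prefix_dict).contains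
              (String.ofList ((s.drop i).take (j + 1 - i))) = true := by
            by_contra hcon
            simp only [Bool.not_eq_true] at hcon
            rw [hroot, if_neg (by simp [hcon])] at hkw
            simp at hkw
          have hw : w = ((PySem.Dict.ofList prefix_dict).getD
              (String.ofList ((s.drop i).take (j + 1 - i))) 0 == 1) := by
            rw [hroot, if_pos (by simp [hcont])] at hkw
            have h2 := congrArg Prod.snd hkw
            exact h2.symm
          rw [hcont]
          simp only [if_true]
          rw [ih g ch (j + 1) _ (by omega) (by omega) (by omega) ?_]
          · congr 1
            by_cases hgd : (PySem.Dict.ofList prefix_dict).getD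
                (String.ofList ((s.drop i).take (j + 1 - i))) 0 = 1
            · simp [hgd, hw]
            · simp [hgd, hw]
          · intro w' hw'
            rw [← flagsAt_cons_of_seek hseek w' hw', hinv (s[j] :: w') (by simp)]
            rw [show (s.drop i).take (j - i) ++ s[j] :: w'
                = ((s.drop i).take (j - i) ++ [s[j]]) ++ w' from by simp]
            rw [← hseg]
        · have hkf : k = false := by simpa using hk
          subst hkf
          have hcont : (PySem.Dict.ofList prefix_dict).contains
              (String.ofList ((s.drop i).take (j + 1 - i))) = false := by
            by_contra hcon
            simp only [Bool.not_eq_false] at hcon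
            rw [hroot, if_pos hcon] at hkw
            simp at hkw
          rw [hcont]
          simp
    · have hj1 : ¬ j + 1 ≤ s.length := by omega
      cases f2 with
      | zero => simp [walkB, dif_neg hj, scanAux]
      | succ g => simp [walkB, dif_neg hj, scanAux, hj1]

theorem segB_eq_segSpec (prefix_dict : List (String × Int)) (s : List Char) :
    ∀ fuel i acc, s.length - i ≤ fuel →
      segB s (buildT prefix_dict) fuel i acc =
        segSpec (PySem.Dict.ofList prefix_dict) s fuel i acc := by
  intro fuel
  induction fuel with
  | zero => intro i acc _; rfl
  | succ fuel ih =>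
    intro i acc hf
    by_cases hi : i < s.length
    · have hwalk : walkB s i (s.length - i) (buildT prefix_dict) i 1
          = scanP (PySem.Dict.ofList prefix_dict) s i := by
        apply walkB_eq prefix_dict s i (s.length - i) (s.length - i) (buildT prefix_dict) i 1
          (le_refl i) (by omega) (by omega)
        intro w hw
        simp
      have hb := scanAux_bounds (PySem.Dict.ofList prefix_dict) s i (s.length - i) (i + 1) 1
        (by omega) (by omega) (by omega)
      simp only [segB, segSpec, if_pos hi]
      rw [hwalk]
      rw [show PySem.List.slice s (some ((i : Nat) : Int))
            (some (((i + (scanP (PySem.Dict.ofList prefix_dict) s i).1 : Nat) : Int)))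
          = (s.drop i).take ((scanP (PySem.Dict.ofList prefix_dict) s i).1) from by
        rw [PySem.List.slice_natCast]
        congr 1
        omega]
      by_cases hoff : (scanP (PySem.Dict.ofList prefix_dict) s i).2
      · simp [hoff]
      · simp only [hoff, Bool.false_eq_true, if_false]
        rw [ih _ _ (by unfold scanP at *; omega)]
    · simp [segB, segSpec, hi]

theorem prefix_cut_alt_eq (prefix_dict : List (String × Int)) (input_str : String) :
    prefix_cut_alt prefix_dict input_str =
      segSpec (PySem.Dict.ofList prefix_dict) input_str.toList
        (input_str.toList.length + 1) 0 [] := by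
  unfold prefix_cut_alt
  rw [segB_eq_segSpec prefix_dict input_str.toList input_str.toList.length 0 [] (by omega)]
  exact segSpec_fuel _ _ _ _ _ _ (by omega) (by omega)

-- ===== VERDICT (by name: the statement is the Claim_ definition above) =====
theorem prefix_cut_spec : Claim_equal_prefix_cut := by
  intro pd input _
  unfold Spec_prefix_cut
  rw [prefix_cut_eq, prefix_cut_alt_eq]
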